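-- pv_equiv track=rewrite | github.com/attilaolah/math | traverse.py | traverse_2d
-- ===== SOURCE A (Python) =====
-- def traverse_2d(cur=0, limit=None):
--     """Generate (x, y) pairs.
--
--     This function iterates through points on a plane.
--
--     If limit is provided, all coordinates will be <= limit.
--
--     Yields points in this order:
--
--         (0, 0) | cur = 0
--
--         (0, 1) | cur = 1
--         (1, 0)
--         (1, 1)
--
--         (0, 2) | cur = 2
--         (1, 2)
--         (2, 0)
--         (2, 1)
--         (2, 2)
--
--         (0, 3) | cur = 3
--         …
--     """
--     while limit is None or cur <= limit:
--         for x__ in range(cur):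
--             yield x__, cur
--         for y__ in range(cur):
--             yield cur, y__
--         yield cur, cur
--         cur += 1
-- ===== SOURCE B (Python) =====
-- def traverse_2d(cur=0, limit=None):
--     # One flat loop over a single offset counter; the branch on `off` replaces
--     # A's two nested range loops and corner yield.
--     off = 0
--     while limit is None or cur <= limit:
--         if off < cur:
--             yield off, cur
--         elif off < 2 * cur:
--             yield cur, off - cur
--         else:
--             yield cur, cur
--         off += 1
--         if off > 2 * cur:
--             off = 0
--             cur += 1
-- ===== Notes on version B (the rewrite author's own statement) =====
-- stated objective: alternative
-- what changed: Replaces A's two nested per-shell range loops plus corner yield with one flat loop over a single offset counter, selecting each point's coordinates by arithmetic comparison of the offset against cur and 2*cur.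
import Mathlib
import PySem

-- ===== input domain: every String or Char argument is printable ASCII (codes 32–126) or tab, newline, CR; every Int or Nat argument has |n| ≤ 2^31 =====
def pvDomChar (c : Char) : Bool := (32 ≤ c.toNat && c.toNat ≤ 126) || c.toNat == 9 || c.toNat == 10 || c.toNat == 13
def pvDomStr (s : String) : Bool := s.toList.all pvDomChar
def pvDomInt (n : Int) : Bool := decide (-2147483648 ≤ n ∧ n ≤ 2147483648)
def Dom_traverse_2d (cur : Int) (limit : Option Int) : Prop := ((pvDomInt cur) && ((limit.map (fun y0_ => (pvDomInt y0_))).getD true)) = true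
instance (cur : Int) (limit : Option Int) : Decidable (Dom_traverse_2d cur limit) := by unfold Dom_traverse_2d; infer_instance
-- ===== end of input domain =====

-- B replaces A's nested per-shell loops with one flat loop over an offset counter (alternative decomposition, same cost).
-- Both are Python generators; materialised as a list. With limit = None both diverge (infinite generator), hence Pre_.

-- ===== PORT A =====
-- shell-by-shell: two range loops then the corner, then cur += 1
def traverse_2d_go (cur l : Int) : List (Int × Int) :=
  if _h : cur ≤ l then
    ((PySem.List.pyRange 0 cur 1).map (fun x => (x, cur))) ++
    ((PySem.List.pyRange 0 cur 1).map (fun y => (cur, y))) ++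
    (cur, cur) :: traverse_2d_go (cur + 1) l
  else []
termination_by (l + 1 - cur).toNat
decreasing_by omega

def traverse_2d (cur : Int) (limit : Option Int) : List (Int × Int) :=
  match limit with
  | none => []          -- A never returns here (infinite generator); excluded by Pre_
  | some l => traverse_2d_go cur l

-- ===== PORT B =====
-- one flat loop over (cur, off); the branch on off selects the point
def traverse_2d_alt_go (cur off l : Int) : List (Int × Int) :=
  if _h : cur ≤ l then
    (if off < cur then (off, cur) else if off < 2 * cur then (cur, off - cur) else (cur, cur)) ::
    (if _h2 : off + 1 > 2 * cur then traverse_2d_alt_go (cur + 1) 0 l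
     else traverse_2d_alt_go cur (off + 1) l)
  else []
termination_by ((l + 1 - cur).toNat, (2 * cur + 1 - off).toNat)
decreasing_by
  · exact Prod.Lex.left _ _ (by omega)
  · exact Prod.Lex.right _ (by omega)

def traverse_2d_alt (cur : Int) (limit : Option Int) : List (Int × Int) :=
  match limit with
  | none => []          -- B never returns here either; excluded by Pre_
  | some l => traverse_2d_alt_go cur 0 l

-- ===== PRECONDITION & SPEC =====
-- Pre_ excludes limit = None, on which both generators are infinite (list() diverges).
def Pre_traverse_2d (cur : Int) (limit : Option Int) : Prop := limit.isSome = true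
instance (cur : Int) (limit : Option Int) : Decidable (Pre_traverse_2d cur limit) := by unfold Pre_traverse_2d; infer_instance
def pvWitness_traverse_2d : Int × Option Int := (0, some 3)

def Spec_traverse_2d (cur : Int) (limit : Option Int) (out : List (Int × Int)) : Prop := out = traverse_2d_alt cur limit
instance (cur : Int) (limit : Option Int) (out : List (Int × Int)) : Decidable (Spec_traverse_2d cur limit out) := by unfold Spec_traverse_2d; infer_instance

-- ===== CLAIM (what is proved, stated in full; the proofs are below) =====
def Claim_equal_traverse_2d : Prop := ∀ (cur : Int) (limit : Option Int), Dom_traverse_2d cur limit → Pre_traverse_2d cur limit → Spec_traverse_2d cur limit (traverse_2d cur limit)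

-- ===== LEMMAS AND PROOFS =====

-- Phase 2 of a shell (right column then corner): off = cur + y with 0 ≤ y ≤ cur
theorem alt_go_phase2 (cur y l : Int) (hc : 0 ≤ cur) (hl : cur ≤ l) (hy0 : 0 ≤ y) (hyc : y ≤ cur) :
    traverse_2d_alt_go cur (cur + y) l =
      ((PySem.List.pyRange y cur 1).map (fun t => (cur, t))) ++
      (cur, cur) :: traverse_2d_alt_go (cur + 1) 0 l := by
  induction hn : (cur - y).toNat generalizing y with
  | zero =>
    have hyc' : y = cur := by omega
    rw [hyc']
    rw [traverse_2d_alt_go, PySem.List.pyRange_one_eq_nil (le_refl cur)]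
    simp only [dif_pos hl]
    have h1 : ¬ (cur + cur < cur) := by omega
    have h2 : ¬ (cur + cur < 2 * cur) := by omega
    have h3 : cur + cur + 1 > 2 * cur := by omega
    rw [if_neg h1, if_neg h2, dif_pos h3]
    simp
  | succ n ih =>
    have hyc' : y < cur := by omega
    rw [traverse_2d_alt_go]
    simp only [dif_pos hl]
    have h1 : ¬ (cur + y < cur) := by omega
    have h2 : cur + y < 2 * cur := by omega
    have h3 : ¬ (cur + y + 1 > 2 * cur) := by omega
    rw [if_neg h1, if_pos h2, dif_neg h3]
    have : cur + y + 1 = cur + (y + 1) := by ring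
    rw [this, ih (y + 1) (by omega) (by omega) (by omega)]
    rw [PySem.List.pyRange_one_cons hyc']
    simp

-- Phase 1 of a shell (top row): off = x with 0 ≤ x ≤ cur
theorem alt_go_phase1 (cur x l : Int) (hc : 0 ≤ cur) (hl : cur ≤ l) (hx0 : 0 ≤ x) (hxc : x ≤ cur) :
    traverse_2d_alt_go cur x l =
      ((PySem.List.pyRange x cur 1).map (fun t => (t, cur))) ++
      ((PySem.List.pyRange 0 cur 1).map (fun t => (cur, t))) ++
      (cur, cur) :: traverse_2d_alt_go (cur + 1) 0 l := by
  induction hn : (cur - x).toNat generalizing x with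
  | zero =>
    have hx' : x = cur := by omega
    rw [hx']
    have := alt_go_phase2 cur 0 l hc hl (le_refl 0) hc
    rw [add_zero] at this
    rw [this, PySem.List.pyRange_one_eq_nil (le_refl cur)]
    simp
  | succ n ih =>
    have hx' : x < cur := by omega
    rw [traverse_2d_alt_go]
    simp only [dif_pos hl]
    have h1 : x < cur := hx'
    have h3 : ¬ (x + 1 > 2 * cur) := by omega
    rw [if_pos h1, dif_neg h3]
    rw [ih (x + 1) (by omega) (by omega) (by omega)]
    rw [PySem.List.pyRange_one_cons hx']
    simp

-- Negative shells yield only the corner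
theorem alt_go_neg (cur l : Int) (hc : cur < 0) (hl : cur ≤ l) :
    traverse_2d_alt_go cur 0 l = (cur, cur) :: traverse_2d_alt_go (cur + 1) 0 l := by
  rw [traverse_2d_alt_go]
  simp only [dif_pos hl]
  have h1 : ¬ ((0:Int) < cur) := by omega
  have h2 : ¬ ((0:Int) < 2 * cur) := by omega
  have h3 : (0:Int) + 1 > 2 * cur := by omega
  rw [if_neg h1, if_neg h2, dif_pos h3]

theorem go_eq_alt_go (cur l : Int) : traverse_2d_go cur l = traverse_2d_alt_go cur 0 l := by
  induction hn : (l + 1 - cur).toNat generalizing cur with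
  | zero =>
    have h : ¬ (cur ≤ l) := by omega
    rw [traverse_2d_go, traverse_2d_alt_go, dif_neg h, dif_neg h]
  | succ n ih =>
    have hl : cur ≤ l := by omega
    rw [traverse_2d_go, dif_pos hl]
    by_cases hc : 0 ≤ cur
    · rw [alt_go_phase1 cur 0 l hc hl (le_refl 0) hc, ih (cur + 1) (by omega)]
    · rw [alt_go_neg cur l (by omega) hl,
        PySem.List.pyRange_one_eq_nil (by omega : cur ≤ 0), ih (cur + 1) (by omega)]
      simp

-- ===== VERDICT (by name: the statement is the Claim_ definition above) =====
theorem traverse_2d_spec : Claim_equal_traverse_2d := by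
  intro cur limit _ hpre
  unfold Spec_traverse_2d traverse_2d traverse_2d_alt
  match limit with
  | none => simp [Pre_traverse_2d] at hpre
  | some l => exact go_eq_alt_go cur l
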